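-- pv_equiv track=rewrite | github.com/CheChu10/tmdb-movie-renamer | renamer.py | get_resolution_class
-- ===== SOURCE A (Python) =====
-- from typing import Any, Callable, Dict, List, Optional, Set, Tuple
--
-- def get_resolution_class(width: Optional[int], height: Optional[int]) -> str:
--     """Classifies video resolution using both width and height with tolerance.
--     Fixes cases like 1792x1080 (should be 1080p) and 3840x1600 (should be 2160p).
--     """
--     if not width or not height:
--         return "N/A"
--
--     w, h = int(width), int(height)
--
--     # Tolerancia (~5%) para encodes no estándar, anamórficos o con recortes.
--     # Con esto: h≈1080 => 1080p aunque w<1920 (p.ej., 1792x1080).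
--     tiers = [
--         (3840, 2160, "2160p"),
--         (2560, 1440, "1440p"),
--         (1920, 1080, "1080p"),
--         (1280,  720,  "720p"),
--     ]
--
--     for w_th, h_th, label in tiers:
--         if w >= int(w_th * 0.95) or h >= int(h_th * 0.95):
--             return label
--
--     return f"{h}p"
-- ===== SOURCE B (Python) =====
-- def _tier_index(value, thresholds):
--     """Index of the highest tier satisfied by value (thresholds descending), or None."""
--     for i, th in enumerate(thresholds):
--         if value >= th:
--             return i
--     return None
--
-- def get_resolution_class(width, height):
--     if not width or not height:
--         return "N/A"
--     w, h = int(width), int(height)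
--     width_ths = [int(t * 0.95) for t in (3840, 2560, 1920, 1280)]
--     height_ths = [int(t * 0.95) for t in (2160, 1440, 1080, 720)]
--     labels = ["2160p", "1440p", "1080p", "720p"]
--     iw = _tier_index(w, width_ths)
--     ih = _tier_index(h, height_ths)
--     idx = min((i for i in (iw, ih) if i is not None), default=None)
--     return labels[idx] if idx is not None else f"{h}p"
-- ===== Notes on version B (the rewrite author's own statement) =====
-- stated objective: alternative
-- what changed: B classifies width and height independently via a reusable helper that finds the index of the highest tier satisfied in a descending threshold list, then merges the two indices with min and looks up the label, instead of A's single loop over triples with an OR per tier.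
import Mathlib
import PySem

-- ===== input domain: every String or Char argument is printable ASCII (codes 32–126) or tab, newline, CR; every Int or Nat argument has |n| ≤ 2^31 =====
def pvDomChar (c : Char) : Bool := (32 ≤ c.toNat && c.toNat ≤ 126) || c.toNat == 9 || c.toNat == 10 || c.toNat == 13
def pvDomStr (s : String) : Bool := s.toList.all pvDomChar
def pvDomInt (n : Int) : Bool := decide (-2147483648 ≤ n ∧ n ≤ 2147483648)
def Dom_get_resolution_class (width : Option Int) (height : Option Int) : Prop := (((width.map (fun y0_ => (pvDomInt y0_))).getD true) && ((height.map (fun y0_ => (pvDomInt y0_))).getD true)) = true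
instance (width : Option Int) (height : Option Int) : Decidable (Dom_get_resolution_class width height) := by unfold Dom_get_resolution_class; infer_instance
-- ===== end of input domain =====

-- B classifies width and height independently with a threshold-index helper and merges
-- the two tier indices with min, instead of A's single loop with an OR per tier (alternative decomposition).


-- ===== PORT A =====
-- int(w_th * 0.95) / int(h_th * 0.95) are computed on the four literal tier constants only;
-- the Python float results are exactly 3648,2432,1824,1216 and 2052,1368,1026,684 (checked), ported as these integer literals.
def aTiersLoop (w h : Int) : List (Int × Int × String) → String → String
  | [], fallback => fallback
  | (wt, ht, label) :: rest, fallback =>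
      if w ≥ wt || h ≥ ht then label else aTiersLoop w h rest fallback

def get_resolution_class (width : Option Int) (height : Option Int) : String :=
  match width, height with
  | some w, some h =>
      if w == 0 || h == 0 then "N/A"   -- `not width or not height` for present ints
      else aTiersLoop w h
        [(3648, 2052, "2160p"), (2432, 1368, "1440p"), (1824, 1026, "1080p"), (1216, 684, "720p")]
        (PySem.Int.toStr h ++ "p")
  | _, _ => "N/A"

-- ===== PORT B =====
-- index of the highest tier satisfied by value in a descending threshold list, or none
def tierIndex (value : Int) : List Int → Option Nat
  | [] => none
  | th :: rest => if value ≥ th then some 0 else (tierIndex value rest).map (· + 1)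

def get_resolution_class_alt (width : Option Int) (height : Option Int) : String :=
  match width with
  | none => "N/A"
  | some w =>
    match height with
    | none => "N/A"
    | some h =>
      if w == 0 || h == 0 then "N/A"
      else
        let labels : List String := ["2160p", "1440p", "1080p", "720p"]
        let iw := tierIndex w [3648, 2432, 1824, 1216]
        let ih := tierIndex h [2052, 1368, 1026, 684]
        let idx : Option Nat :=
          match iw, ih with
          | none, none => none
          | some i, none => some i
          | none, some j => some j
          | some i, some j => some (min i j)
        match idx with
        | some i => labels.getD i ""
        | none => PySem.Int.toStr h ++ "p"

-- ===== PRECONDITION & SPEC =====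
def Spec_get_resolution_class (width : Option Int) (height : Option Int) (out : String) : Prop := out = get_resolution_class_alt width height
instance (width : Option Int) (height : Option Int) (out : String) : Decidable (Spec_get_resolution_class width height out) := by unfold Spec_get_resolution_class; infer_instance

-- ===== CLAIM =====
def Claim_equal_get_resolution_class : Prop := ∀ (width : Option Int) (height : Option Int), Dom_get_resolution_class width height → Spec_get_resolution_class width height (get_resolution_class width height)

-- ===== LEMMAS AND PROOFS =====
theorem get_resolution_class_eq (width height : Option Int) :
    get_resolution_class width height = get_resolution_class_alt width height := by
  match width, height with
  | none, _ => rfl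
  | some _, none => rfl
  | some w, some h =>
    simp only [get_resolution_class, get_resolution_class_alt]
    by_cases hz : (w == 0 || h == 0) = true
    · simp [hz]
    · simp only [hz, if_false, Bool.false_eq_true]
      by_cases h1 : w ≥ 3648 <;> by_cases h2 : w ≥ 2432 <;> by_cases h3 : w ≥ 1824 <;>
        by_cases h4 : w ≥ 1216 <;> by_cases h5 : h ≥ 2052 <;> by_cases h6 : h ≥ 1368 <;>
        by_cases h7 : h ≥ 1026 <;> by_cases h8 : h ≥ 684 <;>
        first
          | (exfalso; omega)
          | simp [aTiersLoop, tierIndex, h1, h2, h3, h4, h5, h6, h7, h8]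

-- ===== VERDICT =====
theorem get_resolution_class_spec : Claim_equal_get_resolution_class := by
  intro width height _
  exact get_resolution_class_eq width height
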